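-- pv_equiv track=rewrite | github.com/hibtc/cpymad | setup.py | first_sections
-- ===== SOURCE A (Python) =====
-- def first_sections(document, heading_type, num_sections):
--     cur_section = 0
--     prev_line = None
--     for line in document.splitlines():
--         if line.startswith(heading_type*3) and set(line) == {heading_type}:
--             cur_section += 1
--             if cur_section == num_sections:
--                 break
--         if prev_line is not None:
--             yield prev_line
--         prev_line = line
-- ===== SOURCE B (Python) =====
-- def first_sections(document, heading_type, num_sections):
--     # Locate the cut point first, then emit a slice (no lagged prev_line state).
--     lines = document.splitlines()
--     cut = len(lines)
--     count = 0
--     for i, line in enumerate(lines):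
--         if line.startswith(heading_type*3) and set(line) == {heading_type}:
--             count += 1
--             if count == num_sections:
--                 cut = i
--                 break
--     yield from lines[:max(cut - 1, 0)]
-- ===== Notes on version B (the rewrite author's own statement) =====
-- stated objective: alternative
-- what changed: Replaced A's single-pass generator with a one-line-delayed prev_line buffer by a two-phase locate-then-slice decomposition: scan the split lines once to find the index of the num_sections-th heading (default: number of lines), then yield the slice lines[:max(cut-1,0)].
import Mathlib
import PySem

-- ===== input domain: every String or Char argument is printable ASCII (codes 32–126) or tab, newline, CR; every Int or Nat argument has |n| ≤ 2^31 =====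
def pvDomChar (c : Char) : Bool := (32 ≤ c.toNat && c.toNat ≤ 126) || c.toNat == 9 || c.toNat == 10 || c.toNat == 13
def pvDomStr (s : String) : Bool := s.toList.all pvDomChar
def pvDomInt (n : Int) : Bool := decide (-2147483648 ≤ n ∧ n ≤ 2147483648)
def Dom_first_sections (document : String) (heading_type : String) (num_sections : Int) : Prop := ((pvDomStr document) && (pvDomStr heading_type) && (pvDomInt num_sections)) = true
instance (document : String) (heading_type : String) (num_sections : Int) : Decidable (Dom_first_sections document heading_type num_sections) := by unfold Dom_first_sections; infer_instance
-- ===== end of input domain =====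

-- B replaces A's lagged single-pass generator by a locate-the-cut-then-slice decomposition (same cost, alternative structure).


-- ===== PORT A =====
-- line.startswith(heading_type*3) and set(line) == {heading_type}
-- (set(line) is a set of 1-char strings, {heading_type} the singleton set of the string)
def fsIsHead (heading_type : String) (line : String) : Bool :=
  PySem.Chars.startswith line.toList (PySem.List.pyRepeat heading_type.toList 3) &&
  PySem.Set.equal (PySem.Set.ofList (line.toList.map (fun c => String.ofList [c])))
                  (PySem.Set.ofList [heading_type])

-- the generator loop, state = (cur_section, prev_line)
def fsGo (heading_type : String) (num_sections : Int) :
    List String → Int → Option String → List String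
  | [], _, _ => []
  | line :: rest, cur, prev =>
    if fsIsHead heading_type line then
      if cur + 1 = num_sections then []
      else (match prev with | none => [] | some p => [p]) ++
           fsGo heading_type num_sections rest (cur + 1) (some line)
    else (match prev with | none => [] | some p => [p]) ++
         fsGo heading_type num_sections rest cur (some line)

def first_sections (document : String) (heading_type : String) (num_sections : Int) : List String :=
  fsGo heading_type num_sections (PySem.Str.splitlines document) 0 none

-- ===== PORT B =====
-- index of the num_sections-th heading line (state = count), defaulting to len(lines)
def fsCut (heading_type : String) (num_sections : Int) : List String → Int → Nat
  | [], _ => 0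
  | line :: rest, count =>
    if fsIsHead heading_type line then
      if count + 1 = num_sections then 0
      else fsCut heading_type num_sections rest (count + 1) + 1
    else fsCut heading_type num_sections rest count + 1

def first_sections_alt (document : String) (heading_type : String) (num_sections : Int) : List String :=
  let lines := PySem.Str.splitlines document
  -- lines[:max(cut-1, 0)] ; Nat subtraction is exactly max(cut-1, 0)
  lines.take (fsCut heading_type num_sections lines 0 - 1)

-- ===== PRECONDITION & SPEC =====
def Spec_first_sections (document : String) (heading_type : String) (num_sections : Int) (out : List String) : Prop := out = first_sections_alt document heading_type num_sections
instance (document : String) (heading_type : String) (num_sections : Int) (out : List String) : Decidable (Spec_first_sections document heading_type num_sections out) := by unfold Spec_first_sections; infer_instance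

-- ===== CLAIM (what is proved, stated in full; the proofs are below) =====
def Claim_equal_first_sections : Prop := ∀ (document : String) (heading_type : String) (num_sections : Int), Dom_first_sections document heading_type num_sections → Spec_first_sections document heading_type num_sections (first_sections document heading_type num_sections)

-- ===== LEMMAS AND PROOFS =====

-- once a prev_line exists, A emits exactly the first `cut` lines of prev :: rest
theorem fsGo_some (ht : String) (num : Int) :
    ∀ (xs : List String) (cur : Int) (p : String),
      fsGo ht num xs cur (some p) = (p :: xs).take (fsCut ht num xs cur) := by
  intro xs
  induction xs with
  | nil => intro cur p; simp [fsGo, fsCut]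
  | cons line rest ih =>
    intro cur p
    simp only [fsGo, fsCut]
    split_ifs with h1 h2
    · simp
    · simp [ih, List.take_succ_cons]
    · simp [ih, List.take_succ_cons]

-- before any prev_line exists, A emits the first `cut - 1` lines
theorem fsGo_none (ht : String) (num : Int) :
    ∀ (xs : List String) (cur : Int),
      fsGo ht num xs cur none = xs.take (fsCut ht num xs cur - 1) := by
  intro xs
  induction xs with
  | nil => intro cur; simp [fsGo, fsCut]
  | cons line rest ih =>
    intro cur
    simp only [fsGo, fsCut]
    split_ifs with h1 h2
    · simp
    · simp [fsGo_some]
    · simp [fsGo_some]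

-- ===== VERDICT (by name: the statement is the Claim_ definition above) =====
theorem first_sections_spec : Claim_equal_first_sections := by
  intro document heading_type num_sections _
  unfold Spec_first_sections first_sections first_sections_alt
  exact fsGo_none heading_type num_sections (PySem.Str.splitlines document) 0
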